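-- pv_equiv track=rewrite | github.com/rdmagm062699/project_euler_python_kata | src/problem_5/solution/processor.py | _is_divisor_we_check
-- ===== SOURCE A (Python) =====
-- def _is_divisor_we_check(divisor, max_divisor):
--     if divisor == max_divisor:
--         return True
--
--     result = True
--     for check in range(divisor + 1, max_divisor + 1):
--         if check % divisor == 0:
--             result = False
--
--     return result
-- ===== SOURCE B (Python) =====
-- def _is_divisor_we_check(divisor, max_divisor):
--     if divisor >= max_divisor:
--         # the checked range (divisor, max_divisor] is empty
--         return True
--     d = abs(divisor)
--     # smallest multiple of d that is >= divisor + 1; no multiple in (divisor, max_divisor] iff it exceeds max_divisor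
--     return -(-(divisor + 1) // d) * d > max_divisor
-- ===== Notes on version B (the rewrite author's own statement) =====
-- stated objective: faster
-- what changed: Replaces the O(max_divisor - divisor) scan for a multiple of divisor in (divisor, max_divisor] by an O(1) closed form: the smallest multiple of |divisor| that is >= divisor+1 is computed by ceiling division and compared with max_divisor; an empty range returns True directly.
import Mathlib
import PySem

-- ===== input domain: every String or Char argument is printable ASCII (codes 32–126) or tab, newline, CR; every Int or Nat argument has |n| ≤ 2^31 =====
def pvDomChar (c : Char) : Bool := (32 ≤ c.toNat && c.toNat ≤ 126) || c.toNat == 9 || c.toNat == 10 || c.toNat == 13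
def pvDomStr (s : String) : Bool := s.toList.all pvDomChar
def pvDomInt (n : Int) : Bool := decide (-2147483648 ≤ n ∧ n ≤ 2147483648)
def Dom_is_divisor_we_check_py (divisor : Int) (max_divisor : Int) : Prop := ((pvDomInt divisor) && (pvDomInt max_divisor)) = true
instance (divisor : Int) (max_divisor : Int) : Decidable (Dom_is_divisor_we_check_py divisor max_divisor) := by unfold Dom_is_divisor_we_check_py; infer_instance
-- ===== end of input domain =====

-- B replaces A's linear scan for a multiple of the divisor with an O(1) ceiling-division closed form (asymptotically faster).


-- ===== PORT A =====
def is_divisor_we_check_py (divisor : Int) (max_divisor : Int) : Bool :=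
  if divisor == max_divisor then true
  else
    (PySem.List.pyRange (divisor + 1) (max_divisor + 1) 1).foldl
      (fun result check => if PySem.Int.mod check divisor == 0 then false else result) true

-- ===== PORT B =====
def is_divisor_we_check_py_alt (divisor : Int) (max_divisor : Int) : Bool :=
  if divisor ≥ max_divisor then true
  else
    let d := |divisor|
    decide (-(PySem.Int.floordiv (-(divisor + 1)) d) * d > max_divisor)

-- ===== PRECONDITION & SPEC =====
-- Pre_ excludes exactly the inputs where A raises ZeroDivisionError at 'check % divisor':
-- divisor = 0 with max_divisor ≥ 1 (the loop is entered with a zero divisor); B raises there too.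
def Pre_is_divisor_we_check_py (divisor : Int) (max_divisor : Int) : Prop :=
  divisor = 0 → max_divisor ≤ 0
instance (divisor : Int) (max_divisor : Int) : Decidable (Pre_is_divisor_we_check_py divisor max_divisor) := by unfold Pre_is_divisor_we_check_py; infer_instance
def pvWitness_is_divisor_we_check_py : Int × Int := (3, 5)
def Spec_is_divisor_we_check_py (divisor : Int) (max_divisor : Int) (out : Bool) : Prop := out = is_divisor_we_check_py_alt divisor max_divisor
instance (divisor : Int) (max_divisor : Int) (out : Bool) : Decidable (Spec_is_divisor_we_check_py divisor max_divisor out) := by unfold Spec_is_divisor_we_check_py; infer_instance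

-- ===== CLAIM (what is proved, stated in full; the proofs are below) =====
def Claim_equal_is_divisor_we_check_py : Prop := ∀ (divisor : Int) (max_divisor : Int), Dom_is_divisor_we_check_py divisor max_divisor → Pre_is_divisor_we_check_py divisor max_divisor → Spec_is_divisor_we_check_py divisor max_divisor (is_divisor_we_check_py divisor max_divisor)

-- ===== LEMMAS AND PROOFS =====

-- A's loop: result is sticky-false, so the fold computes "no element of the list is divisible".
theorem pv_fold_sticky (dv : Int) (xs : List Int) (b : Bool) :
    xs.foldl (fun result check => if PySem.Int.mod check dv == 0 then false else result) b
      = (b && xs.all (fun check => !(PySem.Int.mod check dv == 0))) := by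
  induction xs generalizing b with
  | nil => simp
  | cons x xs ih =>
    simp only [List.foldl_cons, List.all_cons, ih]
    by_cases h : PySem.Int.mod x dv == 0 <;> simp [h]

theorem pv_A_true_iff (dv mx : Int) (hne : dv ≠ mx) :
    is_divisor_we_check_py dv mx = true ↔
      ∀ c : Int, dv + 1 ≤ c → c < mx + 1 → ¬ dv ∣ c := by
  unfold is_divisor_we_check_py
  rw [if_neg (by simpa using hne), pv_fold_sticky]
  simp only [Bool.true_and, List.all_eq_true, PySem.List.mem_pyRange_one]
  constructor
  · intro h c h1 h2 hdvd
    have := h c ⟨h1, h2⟩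
    rw [(PySem.Int.mod_eq_zero_iff_dvd c dv).mpr hdvd] at this
    simp at this
  · intro h c hc
    simp only [Bool.not_eq_eq_eq_not, Bool.not_true, beq_eq_false_iff_ne, ne_eq]
    intro hm
    exact h c hc.1 hc.2 ((PySem.Int.mod_eq_zero_iff_dvd c dv).mp hm)

-- B's closed form: m0 = -((-lo) // d) * d is the least multiple of d that is ≥ lo (d > 0).
theorem pv_m0_ge (lo d : Int) (hd : 0 < d) : lo ≤ -((-lo) / d) * d := by
  have h := Int.ediv_mul_le (-lo) (by omega : d ≠ 0)
  nlinarith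

theorem pv_m0_min (lo d : Int) (hd : 0 < d) (c : Int) (hdvd : d ∣ c) (hc : lo ≤ c) :
    -((-lo) / d) * d ≤ c := by
  obtain ⟨k, rfl⟩ := hdvd
  have hk : -k ≤ (-lo) / d := by
    rw [Int.le_ediv_iff_mul_le hd]
    nlinarith
  nlinarith

theorem pv_B_true_iff (dv mx : Int) (hlt : dv < mx) (hdv : dv ≠ 0) :
    is_divisor_we_check_py_alt dv mx = true ↔
      ∀ c : Int, dv + 1 ≤ c → c < mx + 1 → ¬ dv ∣ c := by
  unfold is_divisor_we_check_py_alt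
  rw [if_neg (by omega)]
  have hd : 0 < |dv| := abs_pos.mpr hdv
  show decide (-(PySem.Int.floordiv (-(dv + 1)) |dv|) * |dv| > mx) = true ↔ _
  rw [PySem.Int.floordiv_eq_ediv_of_pos hd]
  simp only [gt_iff_lt, decide_eq_true_eq]
  constructor
  · intro h c h1 h2 hdvd
    have hdvd' : |dv| ∣ c := (abs_dvd dv c).mpr hdvd
    have := pv_m0_min (dv + 1) |dv| hd c hdvd' h1
    omega
  · intro h
    by_contra hle
    push Not at hle
    set m0 := -((-(dv + 1)) / |dv|) * |dv| with hm0
    have hge := pv_m0_ge (dv + 1) |dv| hd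
    have hdvd : dv ∣ m0 := (abs_dvd dv m0).mp ⟨-((-(dv + 1)) / |dv|), by rw [hm0]; ring⟩
    exact h m0 hge (by omega) hdvd

-- if the scanned range is empty (dv ≥ mx), A's fold is over the empty list and returns true.
theorem pv_A_empty (dv mx : Int) (hge : mx ≤ dv) : is_divisor_we_check_py dv mx = true := by
  unfold is_divisor_we_check_py
  by_cases h : dv = mx
  · simp [h]
  · rw [if_neg (by simpa using h)]
    rw [PySem.List.pyRange_one_eq_nil (by omega)]
    rfl

-- ===== VERDICT (by name: the statement is the Claim_ definition above) =====
theorem is_divisor_we_check_py_spec : Claim_equal_is_divisor_we_check_py := by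
  intro dv mx _ hpre
  unfold Spec_is_divisor_we_check_py
  by_cases hge : mx ≤ dv
  · rw [pv_A_empty dv mx hge]
    unfold is_divisor_we_check_py_alt
    rw [if_pos (by omega)]
  · have hlt : dv < mx := by omega
    have hdv : dv ≠ 0 := by
      intro h0
      have := hpre h0
      omega
    have hA := pv_A_true_iff dv mx (by omega)
    have hB := pv_B_true_iff dv mx hlt hdv
    by_cases hA' : is_divisor_we_check_py dv mx = true
    · rw [hA', Eq.comm, hB]; exact hA.mp hA'
    · have : ¬ is_divisor_we_check_py_alt dv mx = true := fun h => hA' (hA.mpr (hB.mp h))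
      simp only [Bool.not_eq_true] at hA' this
      rw [hA', this]
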